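-- pv_equiv track=rewrite | github.com/xiaobingling93-pixel/opengauss-oGRAC | pkg/deploy/action/storage_deploy/dbstor/dbstor_install.py | check_path_windows
-- ===== SOURCE A (Python) =====
-- def check_path_windows(path_len, path_type_in, ascii_map, char_check_list):
--     for i in range(0, path_len):
--         char_check = ord(path_type_in[i])
--         if (not (ascii_map.get('a_ascii', 0) <= char_check <= ascii_map.get('z_ascii', 0)
--                  or ascii_map.get('a_upper_ascii', 0) <= char_check <= ascii_map.get('z_upper_ascii', 0)
--                  or ascii_map.get('num0_ascii', 0) <= char_check <= ascii_map.get('num9_ascii', 0)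
--                  or char_check in char_check_list)):
--             return False
--     return True
-- ===== SOURCE B (Python) =====
-- def check_path_windows(path_len, path_type_in, ascii_map, char_check_list):
--     # Collect the DISTINCT codepoints of the checked prefix once, then erase
--     # everything the rules allow (whole-set passes: one subtraction for the
--     # explicit list, one filtering pass per range); the path is valid iff
--     # nothing survives.
--     seen = {ord(path_type_in[i]) for i in range(path_len)}
--     seen.difference_update(char_check_list)
--     for lo_key, hi_key in (('a_ascii', 'z_ascii'),
--                            ('a_upper_ascii', 'z_upper_ascii'),
--                            ('num0_ascii', 'num9_ascii')):
--         lo = ascii_map.get(lo_key, 0)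
--         hi = ascii_map.get(hi_key, 0)
--         seen = {c for c in seen if not lo <= c <= hi}
--     return not seen
-- ===== Notes on version B (the rewrite author's own statement) =====
-- stated objective: alternative
-- what changed: Instead of A's per-character early-exit loop testing each char against all four rules, B collects the distinct codepoints of the prefix into a set once, then erases rule-covered codepoints in staged whole-set passes (one set subtraction for char_check_list, one filtering pass per range) and returns whether the set emptied.
-- outside the precondition, e.g. on check_path_windows(5, 'a!', {'a_ascii': 97, 'z_ascii': 122}, []): A returns False, B raises IndexError
import Mathlib
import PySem

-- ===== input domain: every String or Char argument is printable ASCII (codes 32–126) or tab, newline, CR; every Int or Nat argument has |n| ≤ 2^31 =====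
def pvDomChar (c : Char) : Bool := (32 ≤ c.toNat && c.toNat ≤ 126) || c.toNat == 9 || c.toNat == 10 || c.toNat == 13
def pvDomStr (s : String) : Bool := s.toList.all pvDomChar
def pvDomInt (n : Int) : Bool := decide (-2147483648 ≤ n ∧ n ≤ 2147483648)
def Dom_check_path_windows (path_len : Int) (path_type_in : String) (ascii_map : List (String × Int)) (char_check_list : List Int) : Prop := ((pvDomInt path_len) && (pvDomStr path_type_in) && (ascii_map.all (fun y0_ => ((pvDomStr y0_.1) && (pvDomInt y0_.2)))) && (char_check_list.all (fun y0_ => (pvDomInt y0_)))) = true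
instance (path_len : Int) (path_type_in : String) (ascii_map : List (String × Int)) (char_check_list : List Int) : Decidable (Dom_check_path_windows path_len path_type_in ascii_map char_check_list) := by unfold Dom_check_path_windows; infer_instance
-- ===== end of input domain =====

-- B replaces A's per-character early-exit four-way test by building the distinct-codepoint set
-- of the prefix once and erasing the rule-covered codepoints in staged whole-set passes
-- (objective: alternative algorithm; equal result proved on Pre_).

-- ===== PORT A =====
-- A's loop: for i in range(0, path_len): test char against the four rules; early `return False`;
-- none = IndexError on an out-of-range index.
def cpwLoopA (s : List Char) (am : List (String × Int)) (ccl : List Int) : List Int → Option Bool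
  | [] => some true
  | i :: rest =>
    match PySem.List.pyGet? s i with
    | none => none
    | some c =>
      let ch : Int := (c.toNat : Int)
      if ((PySem.Dict.mk am).getD "a_ascii" 0 ≤ ch ∧ ch ≤ (PySem.Dict.mk am).getD "z_ascii" 0)
          ∨ ((PySem.Dict.mk am).getD "a_upper_ascii" 0 ≤ ch ∧ ch ≤ (PySem.Dict.mk am).getD "z_upper_ascii" 0)
          ∨ ((PySem.Dict.mk am).getD "num0_ascii" 0 ≤ ch ∧ ch ≤ (PySem.Dict.mk am).getD "num9_ascii" 0)
          ∨ ch ∈ ccl then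
        cpwLoopA s am ccl rest
      else some false

def check_path_windows (path_len : Int) (path_type_in : String) (ascii_map : List (String × Int)) (char_check_list : List Int) : Bool :=
  (cpwLoopA path_type_in.toList ascii_map char_check_list (PySem.List.pyRange 0 path_len 1)).getD false

-- ===== PORT B =====
-- seen = {ord(path_type_in[i]) for i in range(path_len)}  (none = IndexError)
def cpwCollect (s : List Char) : List Int → PySem.Set Int → Option (PySem.Set Int)
  | [], acc => some acc
  | i :: rest, acc =>
    match PySem.List.pyGet? s i with
    | none => none
    | some c => cpwCollect s rest (PySem.Set.add acc ((c.toNat : Int)))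

-- one staged pass per (lo_key, hi_key) pair: seen = {c for c in seen if not lo <= c <= hi}
def cpwRangePasses (am : List (String × Int)) (seen : PySem.Set Int) : PySem.Set Int :=
  [("a_ascii", "z_ascii"), ("a_upper_ascii", "z_upper_ascii"), ("num0_ascii", "num9_ascii")].foldl
    (fun (acc : PySem.Set Int) p =>
      let lo := (PySem.Dict.mk am).getD p.1 0
      let hi := (PySem.Dict.mk am).getD p.2 0
      acc.filter (fun c => !(decide (lo ≤ c ∧ c ≤ hi)))) seen

def check_path_windows_alt (path_len : Int) (path_type_in : String) (ascii_map : List (String × Int)) (char_check_list : List Int) : Bool :=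
  match cpwCollect path_type_in.toList (PySem.List.pyRange 0 path_len 1) PySem.Set.empty with
  | none => false
  | some seen0 =>
    let seen1 := PySem.Set.diff seen0 char_check_list   -- seen.difference_update(char_check_list)
    (cpwRangePasses ascii_map seen1).isEmpty            -- return not seen

-- ===== PRECONDITION & SPEC =====
-- Pre_ excludes path_len greater than the string length: there A reaches an out-of-range index
-- and raises IndexError unless a disallowed character stops it first (so a few excluded inputs
-- still return False in A while B's eager prefix collection raises; see the cite).
def Pre_check_path_windows (path_len : Int) (path_type_in : String) (ascii_map : List (String × Int)) (char_check_list : List Int) : Prop :=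
  path_len ≤ (path_type_in.toList.length : Int)
instance (path_len : Int) (path_type_in : String) (ascii_map : List (String × Int)) (char_check_list : List Int) : Decidable (Pre_check_path_windows path_len path_type_in ascii_map char_check_list) := by unfold Pre_check_path_windows; infer_instance

def pvWitness_check_path_windows : Int × String × (List (String × Int)) × List Int :=
  (3, "ab_", [("a_ascii", 97), ("z_ascii", 122)], [95])

def Spec_check_path_windows (path_len : Int) (path_type_in : String) (ascii_map : List (String × Int)) (char_check_list : List Int) (out : Bool) : Prop := out = check_path_windows_alt path_len path_type_in ascii_map char_check_list
instance (path_len : Int) (path_type_in : String) (ascii_map : List (String × Int)) (char_check_list : List Int) (out : Bool) : Decidable (Spec_check_path_windows path_len path_type_in ascii_map char_check_list out) := by unfold Spec_check_path_windows; infer_instance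

-- ===== CLAIM (what is proved, stated in full; the proofs are below) =====
def Claim_equal_check_path_windows : Prop := ∀ (path_len : Int) (path_type_in : String) (ascii_map : List (String × Int)) (char_check_list : List Int), Dom_check_path_windows path_len path_type_in ascii_map char_check_list → Pre_check_path_windows path_len path_type_in ascii_map char_check_list → Spec_check_path_windows path_len path_type_in ascii_map char_check_list (check_path_windows path_len path_type_in ascii_map char_check_list)

-- ===== LEMMAS AND PROOFS =====

-- A's per-character test, as a predicate on a codepoint (abbrev: keeps decidability inferable)
abbrev cpwPred (am : List (String × Int)) (ccl : List Int) (ch : Int) : Prop :=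
  (((PySem.Dict.mk am).getD "a_ascii" 0 ≤ ch ∧ ch ≤ (PySem.Dict.mk am).getD "z_ascii" 0)
    ∨ ((PySem.Dict.mk am).getD "a_upper_ascii" 0 ≤ ch ∧ ch ≤ (PySem.Dict.mk am).getD "z_upper_ascii" 0)
    ∨ ((PySem.Dict.mk am).getD "num0_ascii" 0 ≤ ch ∧ ch ≤ (PySem.Dict.mk am).getD "num9_ascii" 0)
    ∨ ch ∈ ccl)


-- the codepoint at index i (used only under "the index is in range")
def cpwCode (s : List Char) (i : Int) : Int :=
  (PySem.List.pyGet? s i).elim 0 (fun c => (c.toNat : Int))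

theorem cpwLoopA_chars (s : List Char) (am : List (String × Int)) (ccl : List Int)
    (idxs : List Int) (hok : ∀ i ∈ idxs, (PySem.List.pyGet? s i).isSome) :
    cpwLoopA s am ccl idxs = some (idxs.all (fun i => decide (cpwPred am ccl (cpwCode s i)))) := by
  induction idxs with
  | nil => rfl
  | cons i rest ih =>
    obtain ⟨c, hc⟩ := Option.isSome_iff_exists.mp (hok i (List.mem_cons_self ..))
    have hcode : cpwCode s i = ((c.toNat : Int)) := by simp [cpwCode, hc]
    simp only [cpwLoopA, hc]
    by_cases h : cpwPred am ccl ((c.toNat : Int))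
    · rw [if_pos (by exact h), ih (fun j hj => hok j (List.mem_cons_of_mem _ hj))]
      simp only [List.all_cons, hcode, decide_eq_true h, Bool.true_and]
    · rw [if_neg (by exact h)]
      simp only [List.all_cons, hcode, decide_eq_false h, Bool.false_and]

theorem cpwCollect_chars (s : List Char) (idxs : List Int)
    (hok : ∀ i ∈ idxs, (PySem.List.pyGet? s i).isSome) (acc : PySem.Set Int) :
    cpwCollect s idxs acc = some (idxs.foldl (fun a i => PySem.Set.add a (cpwCode s i)) acc) := by
  induction idxs generalizing acc with
  | nil => rfl
  | cons i rest ih =>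
    obtain ⟨c, hc⟩ := Option.isSome_iff_exists.mp (hok i (List.mem_cons_self ..))
    simp only [cpwCollect, hc, ih (fun j hj => hok j (List.mem_cons_of_mem _ hj))]
    simp [cpwCode, hc]

theorem cpwMem_foldl_add (idxs : List Int) (s : List Char) (acc : PySem.Set Int) (x : Int) :
    x ∈ idxs.foldl (fun a i => PySem.Set.add a (cpwCode s i)) acc ↔
      x ∈ acc ∨ ∃ i ∈ idxs, cpwCode s i = x := by
  induction idxs generalizing acc with
  | nil => simp
  | cons i rest ih =>
    simp only [List.foldl_cons, ih, PySem.Set.mem_add]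
    constructor
    · rintro (⟨h | h⟩ | ⟨j, hj, hx⟩)
      · exact Or.inl h
      · exact Or.inr ⟨i, by simp, h.symm⟩
      · exact Or.inr ⟨j, by simp [hj], hx⟩
    · rintro (h | ⟨j, hj, hx⟩)
      · exact Or.inl (Or.inl h)
      · rcases List.mem_cons.mp hj with rfl | hj
        · exact Or.inl (Or.inr hx.symm)
        · exact Or.inr ⟨j, hj, hx⟩

theorem cpwMem_rangePasses (am : List (String × Int)) (seen : PySem.Set Int) (x : Int) :
    x ∈ cpwRangePasses am seen ↔
      x ∈ seen
        ∧ ¬((PySem.Dict.mk am).getD "a_ascii" 0 ≤ x ∧ x ≤ (PySem.Dict.mk am).getD "z_ascii" 0)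
        ∧ ¬((PySem.Dict.mk am).getD "a_upper_ascii" 0 ≤ x ∧ x ≤ (PySem.Dict.mk am).getD "z_upper_ascii" 0)
        ∧ ¬((PySem.Dict.mk am).getD "num0_ascii" 0 ≤ x ∧ x ≤ (PySem.Dict.mk am).getD "num9_ascii" 0) := by
  simp only [cpwRangePasses, List.foldl_cons, List.foldl_nil, List.mem_filter]
  simp
  constructor
  · rintro ⟨⟨⟨hm, h1⟩, h2⟩, h3⟩
    refine ⟨hm, ?_, ?_, ?_⟩ <;> omega
  · rintro ⟨hm, h1, h2, h3⟩
    refine ⟨⟨⟨hm, ?_⟩, ?_⟩, ?_⟩ <;> omega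

-- the main bridge: under Pre_, A's early-exit loop equals B's collect-then-erase pipeline
theorem cpw_eq (s : List Char) (am : List (String × Int)) (ccl : List Int) (n : Int)
    (hn : n ≤ (s.length : Int)) :
    (cpwLoopA s am ccl (PySem.List.pyRange 0 n 1)).getD false =
      (match cpwCollect s (PySem.List.pyRange 0 n 1) PySem.Set.empty with
        | none => false
        | some seen0 => (cpwRangePasses am (PySem.Set.diff seen0 ccl)).isEmpty) := by
  have hok : ∀ i ∈ PySem.List.pyRange 0 n 1, (PySem.List.pyGet? s i).isSome := by
    intro i hi
    rw [PySem.List.mem_pyRange_one] at hi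
    rw [PySem.List.pyGet?_of_nonneg s hi.1]
    rw [List.getElem?_eq_getElem (by omega : i.toNat < s.length)]
    rfl
  rw [cpwLoopA_chars s am ccl _ hok, cpwCollect_chars s _ hok PySem.Set.empty]
  simp only [Option.getD_some]
  rw [Bool.eq_iff_iff]
  constructor
  · intro hall
    simp only [List.all_eq_true, decide_eq_true_eq] at hall
    simp only [List.isEmpty_iff, List.eq_nil_iff_forall_not_mem]
    intro x hx
    rw [cpwMem_rangePasses] at hx
    obtain ⟨hx1, h1, h2, h3⟩ := hx
    rw [PySem.Set.mem_diff] at hx1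
    obtain ⟨hxS, hxccl⟩ := hx1
    rw [cpwMem_foldl_add] at hxS
    rcases hxS with h | ⟨i, hi, rfl⟩
    · simp [PySem.Set.empty] at h
    · have := hall i hi
      unfold cpwPred at this
      tauto
  · intro hemp
    simp only [List.isEmpty_iff, List.eq_nil_iff_forall_not_mem] at hemp
    simp only [List.all_eq_true, decide_eq_true_eq]
    intro i hi
    by_contra hbad
    apply hemp (cpwCode s i)
    rw [cpwMem_rangePasses, PySem.Set.mem_diff, cpwMem_foldl_add]
    unfold cpwPred at hbad
    exact ⟨⟨Or.inr ⟨i, hi, rfl⟩, fun h => hbad (Or.inr (Or.inr (Or.inr h)))⟩,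
      fun h => hbad (Or.inl h), fun h => hbad (Or.inr (Or.inl h)),
      fun h => hbad (Or.inr (Or.inr (Or.inl h)))⟩

-- ===== VERDICT (by name: the statement is the Claim_ definition above) =====
theorem check_path_windows_spec : Claim_equal_check_path_windows := by
  intro path_len path_type_in ascii_map char_check_list _ hpre
  unfold Spec_check_path_windows check_path_windows check_path_windows_alt
  exact cpw_eq _ _ _ _ hpre
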